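-- pv_equiv track=rewrite | github.com/thaheer-uzamaki/Code | Simple adding.py | simple_adding
-- ===== SOURCE A (Python) =====
-- def simple_adding(num):
--     total=0
--     for num in range(num+1):
--         total+=num
--     token='abcdefg'
--     res=str(total)+token
--     res_list=list(res)
--     for i in range(2,len(res),3):
--         res_list[i]='x'
--     res=''.join(res_list)
--     return res
-- ===== SOURCE B (Python) =====
-- def simple_adding(num):
--     total = num * (num + 1) // 2 if num >= 0 else 0
--     return ''.join('x' if i % 3 == 2 else c
--                    for i, c in enumerate(str(total) + 'abcdefg'))
-- ===== Notes on version B (the rewrite author's own statement) =====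
-- stated objective: faster
-- what changed: Replaces the O(num) summing loop by the closed form n(n+1)//2 (0 for negative num) and the index-stepping mutation loop by a single enumerate pass marking positions i%3==2.
import Mathlib
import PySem

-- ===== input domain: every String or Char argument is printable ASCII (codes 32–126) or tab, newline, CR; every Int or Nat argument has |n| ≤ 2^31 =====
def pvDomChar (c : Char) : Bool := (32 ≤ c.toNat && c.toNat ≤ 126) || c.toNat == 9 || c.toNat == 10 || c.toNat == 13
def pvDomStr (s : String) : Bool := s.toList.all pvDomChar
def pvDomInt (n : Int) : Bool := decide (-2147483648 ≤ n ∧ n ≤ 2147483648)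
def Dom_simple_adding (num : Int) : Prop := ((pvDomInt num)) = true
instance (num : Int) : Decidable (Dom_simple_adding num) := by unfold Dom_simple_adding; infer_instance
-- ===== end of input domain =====

-- B replaces A's O(num) summing loop with the closed form n(n+1)//2 (0 for num < 0)
-- and A's index-stepping mutation loop with one enumerate pass marking positions i % 3 == 2.

-- ===== PORT A =====
def simple_adding (num : Int) : String :=
  let total := (PySem.List.pyRange 0 (num + 1) 1).foldl (fun acc n => acc + n) 0
  let token : List Char := "abcdefg".toList
  let res : List Char := PySem.Int.toChars total ++ token
  let res_list :=
    (PySem.List.pyRange 2 (res.length : Int) 3).foldl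
      (fun l i => PySem.List.pySetD l i 'x') res
  String.mk res_list

-- ===== PORT B =====
def simple_adding_alt (num : Int) : String :=
  let total := if num ≥ 0 then PySem.Int.floordiv (num * (num + 1)) 2 else 0
  let cs : List Char := PySem.Int.toChars total ++ "abcdefg".toList
  String.mk ((PySem.List.enumerate cs).map
    (fun p => if PySem.Int.mod p.1 3 = 2 then 'x' else p.2))

-- ===== PRECONDITION & SPEC =====
def Spec_simple_adding (num : Int) (out : String) : Prop := out = simple_adding_alt num
instance (num : Int) (out : String) : Decidable (Spec_simple_adding num out) := by unfold Spec_simple_adding; infer_instance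

-- ===== CLAIM (what is proved, stated in full; the proofs are below) =====
def Claim_equal_simple_adding : Prop := ∀ (num : Int), Dom_simple_adding num → Spec_simple_adding num (simple_adding num)

-- ===== LEMMAS AND PROOFS =====

-- A's summing loop over range(num+1), doubled, is num*(num+1); by induction on the upper bound.
theorem twice_sum_pyRange (m : Nat) :
    2 * ((PySem.List.pyRange 0 (m : Int) 1).foldl (fun acc n => acc + n) 0) = (m : Int) * (m - 1) := by
  induction m with
  | zero => simp [PySem.List.pyRange_one_eq_nil (by omega : (0:Int) ≤ 0)]
  | succ k ih =>
    rw [show ((k + 1 : Nat) : Int) = (k : Int) + 1 by push_cast; ring,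
        PySem.List.pyRange_one_succ_right (by positivity : (0:Int) ≤ (k : Int)),
        List.foldl_append]
    simp only [List.foldl_cons, List.foldl_nil]
    linarith [ih, sq_nonneg ((k : Int))]

-- A's total equals B's closed form.
theorem total_eq (num : Int) :
    (PySem.List.pyRange 0 (num + 1) 1).foldl (fun acc n => acc + n) 0
      = (if num ≥ 0 then PySem.Int.floordiv (num * (num + 1)) 2 else 0) := by
  by_cases h : num ≥ 0
  · have hm : ((num + 1).toNat : Int) = num + 1 := by omega
    have := twice_sum_pyRange (num + 1).toNat
    rw [hm] at this
    simp only [h, if_pos]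
    set S := (PySem.List.pyRange 0 (num + 1) 1).foldl (fun acc n => acc + n) 0 with hS
    rw [eq_comm, PySem.Int.floordiv_eq_iff_of_pos (by omega : (0:Int) < 2)]
    constructor <;> nlinarith [this]
  · simp only [h, if_false]
    rw [PySem.List.pyRange_one_eq_nil (by omega : num + 1 ≤ 0)]
    rfl

-- A's mutation loop, elementwise: every listed (non-negative, in-range) index holds 'x',
-- the rest are unchanged; length is preserved.
theorem foldl_pySetD_spec (idxs : List Int) :
    ∀ (cs : List Char), (∀ i ∈ idxs, 0 ≤ i ∧ i < (cs.length : Int)) →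
      (idxs.foldl (fun l i => PySem.List.pySetD l i 'x') cs).length = cs.length ∧
      ∀ (j : Nat),
        (idxs.foldl (fun l i => PySem.List.pySetD l i 'x') cs)[j]?
          = if (j : Int) ∈ idxs then some 'x' else cs[j]? := by
  induction idxs with
  | nil => intro cs _; simp
  | cons i rest ih =>
    intro cs hidx
    have hi := hidx i (by simp)
    have hset : PySem.List.pySetD cs i 'x' = cs.set i.toNat 'x' :=
      PySem.List.pySetD_of_nonneg cs 'x' hi.1
    have hrest : ∀ k ∈ rest, 0 ≤ k ∧ k < ((cs.set i.toNat 'x').length : Int) := by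
      intro k hk
      have := hidx k (by simp [hk])
      simpa using this
    obtain ⟨hlen, hget⟩ := ih (cs.set i.toNat 'x') hrest
    simp only [List.foldl_cons, hset]
    refine ⟨by simpa using hlen, ?_⟩
    intro j
    rw [hget j]
    by_cases hjr : (j : Int) ∈ rest
    · simp [hjr]
    · by_cases hji : (j : Int) = i
      · have hjlt : j < cs.length := by omega
        have : i.toNat = j := by omega
        simp [hjr, hji, this, List.getElem?_set, hjlt]
      · have hne : i.toNat ≠ j := by omega
        simp [hjr, hji, hne]


-- The two marking passes agree on every list of characters.
theorem mark_eq (cs : List Char) :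
    (PySem.List.pyRange 2 (cs.length : Int) 3).foldl (fun l i => PySem.List.pySetD l i 'x') cs
      = (PySem.List.enumerate cs).map (fun p => if PySem.Int.mod p.1 3 = 2 then 'x' else p.2) := by
  have h3 : (0:Int) < 3 := by omega
  have hidx : ∀ i ∈ PySem.List.pyRange 2 (cs.length : Int) 3, 0 ≤ i ∧ i < (cs.length : Int) := by
    intro i hi
    have := (PySem.List.mem_pyRange_iff_of_pos h3 i).mp hi
    omega
  obtain ⟨hlen, hget⟩ := foldl_pySetD_spec (PySem.List.pyRange 2 (cs.length : Int) 3) cs hidx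
  apply List.ext_getElem?
  intro j
  rw [hget j, List.getElem?_map, PySem.List.getElem?_enumerate]
  by_cases hj : j < cs.length
  · rw [List.getElem?_eq_getElem hj]
    have hmem : (j : Int) ∈ PySem.List.pyRange 2 (cs.length : Int) 3
        ↔ ((j : Int)) % 3 = 2 := by
      rw [PySem.List.mem_pyRange_iff_of_pos h3]
      omega
    have hmod2 : PySem.Int.mod ((0 : Int) + (j : Nat)) 3 = ((j : Int)) % 3 := by
      rw [PySem.Int.mod_eq_emod_of_pos (by omega : (0:Int) < 3)]; ring_nf
    by_cases hmod : ((j : Int)) % 3 = 2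
    · rw [if_pos (hmem.mpr hmod)]; simp [hmod2, hmod]
    · rw [if_neg (fun h => hmod (hmem.mp h))]; simp [hmod2, hmod]
  · have hnm : (j : Int) ∉ PySem.List.pyRange 2 (cs.length : Int) 3 := fun h => hj (by
      have := (PySem.List.mem_pyRange_iff_of_pos h3 _).mp h; omega)
    simp [hnm, List.getElem?_eq_none (by omega : cs.length ≤ j)]

-- ===== VERDICT (by name: the statement is the Claim_ definition above) =====
theorem simple_adding_spec : Claim_equal_simple_adding := by
  intro num _
  show simple_adding num = simple_adding_alt num
  simp only [simple_adding, simple_adding_alt, total_eq]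
  exact congrArg String.mk (mark_eq _)
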